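-- pv_equiv track=rewrite | github.com/theuerse/emulation_lib | apps/ndn_network_overlay.py | getNextFibHops
-- ===== SOURCE A (Python) =====
-- def getNextFibHops(paths):
--     cost_dict = {}
--     for path in paths:
--         nextHop = path[1]
--
--         if nextHop in cost_dict.keys():
--             if len(path) < len(cost_dict[nextHop]):
--                 cost_dict[nextHop] = path
--         else:
--             cost_dict[nextHop] = path
--
--     return cost_dict.values()
-- ===== SOURCE B (Python) =====
-- def getNextFibHops(paths):
--     groups = {}
--     for path in paths:
--         groups.setdefault(path[1], []).append(path)
--     return {hop: min(group, key=len) for hop, group in groups.items()}.values()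
-- ===== Notes on version B (the rewrite author's own statement) =====
-- stated objective: simpler
-- what changed: Replaces the running-best update loop (compare-and-overwrite per path) by a group-then-reduce decomposition: one pass groups paths by their next hop, then a dict comprehension picks min(group, key=len), relying on min's first-minimum rule to reproduce A's strict-< tie-break.
import Mathlib
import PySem

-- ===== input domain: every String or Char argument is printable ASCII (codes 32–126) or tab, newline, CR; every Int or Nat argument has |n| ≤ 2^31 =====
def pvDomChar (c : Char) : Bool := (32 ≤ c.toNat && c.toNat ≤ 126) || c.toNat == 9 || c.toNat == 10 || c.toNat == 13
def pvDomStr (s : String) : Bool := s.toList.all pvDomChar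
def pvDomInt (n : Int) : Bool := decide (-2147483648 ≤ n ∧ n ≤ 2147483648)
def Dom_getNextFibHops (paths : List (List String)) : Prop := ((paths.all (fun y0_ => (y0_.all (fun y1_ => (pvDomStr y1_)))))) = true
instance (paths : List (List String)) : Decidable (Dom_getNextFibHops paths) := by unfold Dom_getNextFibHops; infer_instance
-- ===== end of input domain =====

-- B replaces A's running-best compare-and-overwrite loop by a group-by-nextHop pass
-- followed by a per-group first-minimum reduction (objective: simpler decomposition).

-- ===== PORT A =====
-- loop body of A: nextHop = path[1]; keep the strictly shorter path per nextHop
def pvStepA (d : PySem.Dict String (List String)) (path : List String) :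
    PySem.Dict String (List String) :=
  match PySem.List.pyGet? path 1 with
  | none => d   -- path[1] raises IndexError in Python; such inputs are excluded by Pre_
  | some nextHop =>
    if d.contains nextHop then
      if path.length < (d.getD nextHop []).length then d.insert nextHop path else d
    else d.insert nextHop path

def getNextFibHops (paths : List (List String)) : List (List String) :=
  (paths.foldl pvStepA PySem.Dict.empty).values

-- ===== PORT B =====
-- min(group, key=len): first element of minimal length; groups built below are never empty,
-- so the .getD [] default (Python min would raise on []) is never consulted.
def pvMinLen (g : List (List String)) : List String :=
  (PySem.List.min? g (fun x => x.length)).getD []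

-- loop body of B: groups.setdefault(path[1], []).append(path)
def pvStepB (d : PySem.Dict String (List (List String))) (path : List String) :
    PySem.Dict String (List (List String)) :=
  match PySem.List.pyGet? path 1 with
  | none => d   -- path[1] raises IndexError in Python; such inputs are excluded by Pre_
  | some nextHop => d.modify nextHop [] (· ++ [path])

def getNextFibHops_alt (paths : List (List String)) : List (List String) :=
  let groups := paths.foldl pvStepB PySem.Dict.empty
  -- dict comprehension {hop: min(group, key=len) for hop, group in groups.items()}
  let result := groups.items.foldl (fun d p => d.insert p.1 (pvMinLen p.2)) PySem.Dict.empty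
  result.values

-- ===== PRECONDITION & SPEC =====
-- Pre_ excludes exactly the inputs on which Python A raises IndexError: a path with
-- fewer than two entries makes path[1] raise.
def Pre_getNextFibHops (paths : List (List String)) : Prop :=
  ∀ p ∈ paths, 2 ≤ p.length
instance (paths : List (List String)) : Decidable (Pre_getNextFibHops paths) := by
  unfold Pre_getNextFibHops; infer_instance

def pvWitness_getNextFibHops : List (List String) :=
  [["a", "b", "c"], ["a", "b"], ["x", "y"]]

def Spec_getNextFibHops (paths : List (List String)) (out : List (List String)) : Prop :=
  out = getNextFibHops_alt paths
instance (paths : List (List String)) (out : List (List String)) :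
    Decidable (Spec_getNextFibHops paths out) := by unfold Spec_getNextFibHops; infer_instance

-- ===== CLAIM (what is proved, stated in full; the proofs are below) =====
def Claim_equal_getNextFibHops : Prop :=
  ∀ (paths : List (List String)), Dom_getNextFibHops paths → Pre_getNextFibHops paths →
    Spec_getNextFibHops paths (getNextFibHops paths)

-- ===== LEMMAS AND PROOFS =====

-- appending one element to the list steps Python's first-minimum once
lemma pv_min?_append_singleton (g : List (List String)) (p : List String) :
    PySem.List.min? (g ++ [p]) (fun x => x.length)
      = match PySem.List.min? g (fun x => x.length) with
        | none => some p
        | some m => if p.length < m.length then some p else some m := by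
  rcases h : PySem.List.min? g (fun x => x.length) with _ | m <;>
    simp only [PySem.List.min?] at h ⊢ <;> rw [List.foldl_append, h] <;> simp

-- one loop step preserves the invariant relating A's running dict to B's group dict
lemma pv_step (path : List String) (dA : PySem.Dict String (List String))
    (dG : PySem.Dict String (List (List String)))
    (hitems : dA.items = dG.items.map (fun p => (p.1, pvMinLen p.2)))
    (hnodup : dG.keys.Nodup)
    (hne : ∀ p ∈ dG.items, p.2 ≠ []) :
    (pvStepA dA path).items = (pvStepB dG path).items.map (fun p => (p.1, pvMinLen p.2))
    ∧ (pvStepB dG path).keys.Nodup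
    ∧ (∀ p ∈ (pvStepB dG path).items, p.2 ≠ []) := by
  rcases hidx : PySem.List.pyGet? path 1 with _ | k
  · simp only [pvStepA, pvStepB, hidx]
    exact ⟨hitems, hnodup, hne⟩
  · have hcont : dA.contains k = dG.contains k := by
      simp [PySem.Dict.contains, hitems, List.any_map, Function.comp_def]
    by_cases hc : dG.contains k = true
    · -- key already present: A keeps the shorter path, B appends to the group
      have hAc : dA.contains k = true := by rw [hcont]; exact hc
      have hget : dA.get? k = (dG.get? k).map pvMinLen := by
        simp [PySem.Dict.get?, hitems, List.find?_map, Function.comp_def, Option.map_map]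
      obtain ⟨g, hg⟩ : ∃ g, dG.get? k = some g := by
        have h := hc
        rw [PySem.Dict.contains_eq_isSome_get?] at h
        exact Option.isSome_iff_exists.mp h
      have hgmem : (k, g) ∈ dG.items := PySem.Dict.mem_items_of_get?_eq_some dG hg
      have hgne : g ≠ [] := hne (k, g) hgmem
      obtain ⟨m, hm⟩ : ∃ m, PySem.List.min? g (fun x => x.length) = some m := by
        rcases h : PySem.List.min? g (fun x => x.length) with _ | m
        · rw [PySem.List.min?_eq_none_iff] at h
          exact absurd h hgne
        · exact ⟨m, rfl⟩
      have hmg : pvMinLen g = m := by simp [pvMinLen, hm]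
      have hAval : dA.getD k [] = m := by
        simp [PySem.Dict.getD_eq_get?_getD, hget, hg, hmg]
      have hgd : dG.getD k [] = g := by simp [PySem.Dict.getD_eq_get?_getD, hg]
      have hBstep : pvStepB dG path = dG.insert k (g ++ [path]) := by
        simp [pvStepB, hidx, PySem.Dict.modify, hgd]
      have hBitems : (pvStepB dG path).items
          = dG.items.map (fun p => if p.1 == k then (k, g ++ [path]) else p) := by
        rw [hBstep]; simp [PySem.Dict.insert, hc]
      have hmap : pvMinLen (g ++ [path])
          = if path.length < m.length then path else m := by
        unfold pvMinLen
        rw [pv_min?_append_singleton, hm]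
        by_cases hlt : path.length < m.length <;> simp [hlt]
      have hAstep : pvStepA dA path
          = if path.length < m.length then dA.insert k path else dA := by
        simp [pvStepA, hidx, hAc, hAval]
      refine ⟨?_, ?_, ?_⟩
      · rw [hAstep, hBitems, List.map_map]
        by_cases hlt : path.length < m.length
        · rw [if_pos hlt]
          have hAins : (dA.insert k path).items
              = dA.items.map (fun p => if p.1 == k then (k, path) else p) := by
            simp [PySem.Dict.insert, hAc]
          rw [hAins, hitems, List.map_map]
          refine List.map_congr_left ?_
          intro p hp
          by_cases h1 : p.1 = k
          · simp [h1, hmap, hlt]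
          · simp [h1]
        · rw [if_neg hlt, hitems]
          refine List.map_congr_left ?_
          intro p hp
          by_cases h1 : p.1 = k
          · have hgp : dG.get? p.1 = some p.2 :=
              PySem.Dict.get?_of_mem_items (d := dG) (by simpa using hp) hnodup
            rw [h1, hg] at hgp
            have hpg : p.2 = g := by injection hgp with h; exact h.symm
            simp [h1, hmap, hlt, hpg, hmg]
          · simp [h1]
      · have hkeq : (pvStepB dG path).keys = dG.keys := by
          simp only [PySem.Dict.keys, hBitems, List.map_map]
          refine List.map_congr_left ?_
          intro p hp
          by_cases h1 : p.1 = k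
          · simp [h1]
          · simp [h1]
        rw [hkeq]; exact hnodup
      · rw [hBitems]
        intro q hq
        obtain ⟨p, hp, rfl⟩ := List.mem_map.mp hq
        by_cases h1 : p.1 = k
        · simp [h1]
        · simpa [h1] using hne p hp
    · -- new key: both sides append a fresh entry
      have hc' : dG.contains k = false := by revert hc; cases dG.contains k <;> simp
      have hAc : dA.contains k = false := by rw [hcont]; exact hc'
      have hfind : List.find? (fun p => p.1 == k) dG.items = none := by
        rw [List.find?_eq_none]
        intro p hp
        have hany := hc'
        simp only [PySem.Dict.contains] at hany
        simpa using (List.any_eq_false.mp hany) p hp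
      have hgd : dG.getD k [] = [] := by
        simp [PySem.Dict.getD_eq_get?_getD, PySem.Dict.get?, hfind]
      have hBstep : pvStepB dG path = dG.insert k [path] := by
        simp [pvStepB, hidx, PySem.Dict.modify, hgd]
      have hAstep : pvStepA dA path = dA.insert k path := by
        simp [pvStepA, hidx, hAc]
      have hAins : (dA.insert k path).items = dA.items ++ [(k, path)] := by
        simp [PySem.Dict.insert, hAc]
      have hBins : (dG.insert k [path]).items = dG.items ++ [(k, [path])] := by
        simp [PySem.Dict.insert, hc']
      have hknotmem : k ∉ dG.keys := by
        intro hmem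
        rw [← PySem.Dict.contains_iff_mem_keys] at hmem
        rw [hc'] at hmem; exact Bool.noConfusion hmem
      have hkeys : (dG.insert k [path]).keys = dG.keys ++ [k] := by
        simp [PySem.Dict.insert, PySem.Dict.keys, hc']
      refine ⟨?_, ?_, ?_⟩
      · rw [hAstep, hBstep, hAins, hBins, List.map_append, hitems]
        rfl
      · rw [hBstep, hkeys]
        simp [List.nodup_append, hnodup]
        exact fun a ha h => hknotmem (h ▸ ha)
      · rw [hBstep, hBins]
        intro q hq
        rcases List.mem_append.mp hq with h | h
        · exact hne q h
        · simp at h; subst h; simp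

-- main invariant, folded over the whole path list
lemma pv_inv (paths : List (List String)) :
    ∀ (dA : PySem.Dict String (List String)) (dG : PySem.Dict String (List (List String))),
      dA.items = dG.items.map (fun p => (p.1, pvMinLen p.2)) →
      dG.keys.Nodup →
      (∀ p ∈ dG.items, p.2 ≠ []) →
      (paths.foldl pvStepA dA).items
        = (paths.foldl pvStepB dG).items.map (fun p => (p.1, pvMinLen p.2))
      ∧ (paths.foldl pvStepB dG).keys.Nodup
      ∧ (∀ p ∈ (paths.foldl pvStepB dG).items, p.2 ≠ []) := by
  induction paths with
  | nil => intro dA dG h1 h2 h3; exact ⟨h1, h2, h3⟩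
  | cons path rest ih =>
    intro dA dG h1 h2 h3
    obtain ⟨g1, g2, g3⟩ := pv_step path dA dG h1 h2 h3
    simpa using ih (pvStepA dA path) (pvStepB dG path) g1 g2 g3

-- ===== VERDICT (by name: the statement is the Claim_ definition above) =====
theorem getNextFibHops_spec : Claim_equal_getNextFibHops := by
  intro paths _ _
  unfold Spec_getNextFibHops getNextFibHops getNextFibHops_alt
  obtain ⟨h1, h2, _⟩ := pv_inv paths PySem.Dict.empty PySem.Dict.empty rfl (by simp) (by simp [PySem.Dict.empty])
  set groups := paths.foldl pvStepB PySem.Dict.empty with hgroups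
  have hres : (groups.items.foldl (fun d p => d.insert p.1 (pvMinLen p.2)) PySem.Dict.empty).items
      = PySem.Dict.empty.items ++ groups.items.map (fun p => (p.1, pvMinLen p.2)) := by
    exact PySem.Dict.items_foldl_insert_fresh groups.items (fun p => p.1)
      (fun p => pvMinLen p.2) PySem.Dict.empty (by intro a _; simp)
      (by simpa [PySem.Dict.keys] using h2)
  simp only [PySem.Dict.values, h1, hres]
  simp [PySem.Dict.empty]
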